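-- pv_equiv track=rewrite | github.com/Voyager1744/contest | Intern Backend Meetup 2024/С.py | emotional_rollercoaster
-- ===== SOURCE A (Python) =====
-- def emotional_rollercoaster(s):
--     max_emotion = float('-inf')
--     max_range = ''
--     start = 0
--
--     last_index = {}
--
--     for i, char in enumerate(s):
--         last_index[char] = i
--         min_index = min(last_index.values())
--         max_index = max(last_index.values())
--         emotion = ord(s[max_index]) - ord(s[min_index])
--         if emotion > max_emotion:
--             max_emotion = emotion
--             max_range = s[min_index:max_index + 1]
--
--     return max_range
-- ===== SOURCE B (Python) =====
-- def emotional_rollercoaster(s):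
--     # One-pass two-pointer: max_index is always i; min of last-occurrence
--     # indices is monotone, tracked by pointer p over a sliding window whose
--     # character counts tell when the front character re-occurs later.
--     best = None
--     best_range = ''
--     cnt = {}
--     p = 0
--     for i, ch in enumerate(s):
--         cnt[ch] = cnt.get(ch, 0) + 1
--         while cnt[s[p]] > 1:
--             cnt[s[p]] -= 1
--             p += 1
--         emotion = ord(ch) - ord(s[p])
--         if best is None or emotion > best:
--             best = emotion
--             best_range = s[p:i + 1]
--     return best_range
-- ===== Notes on version B (the rewrite author's own statement) =====
-- stated objective: faster
-- what changed: Replaces the per-character min/max scans over the last-occurrence dict with a one-pass two-pointer sweep: max_index is always i, and the monotone min of last occurrences is tracked by a forward pointer driven by window character counts.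
import Mathlib
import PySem

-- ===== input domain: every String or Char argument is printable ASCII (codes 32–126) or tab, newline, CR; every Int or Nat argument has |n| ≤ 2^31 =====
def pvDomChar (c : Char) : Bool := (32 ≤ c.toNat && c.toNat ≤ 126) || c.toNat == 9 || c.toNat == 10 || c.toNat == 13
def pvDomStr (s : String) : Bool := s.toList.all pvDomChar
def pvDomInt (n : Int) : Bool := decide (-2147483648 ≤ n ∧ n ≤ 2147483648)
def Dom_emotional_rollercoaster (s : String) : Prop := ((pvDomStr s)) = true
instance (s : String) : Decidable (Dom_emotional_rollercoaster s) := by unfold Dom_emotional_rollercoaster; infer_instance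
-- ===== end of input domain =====

-- B replaces A's per-character min/max scans over the last-occurrence dict by a one-pass
-- two-pointer sweep (max index is always i; the minimal last-occurrence index is monotone
-- and tracked by a forward pointer driven by window character counts); measurably faster.

-- ===== PORT A =====
-- A's test 'emotion > max_emotion', max_emotion : Option Int with none = float('-inf')
def pvGtNegInf (maxEmotion : Option Int) (e : Int) : Bool :=
  match maxEmotion with
  | none => true          -- anything is > -inf
  | some m => decide (m < e)

-- loop body of A: insert last_index[char] = i, take min/max of the values, compare/update
def pvStepA (t : List Char) (st : Option Int × List Char × PySem.Dict Char Int)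
    (iv : Int × Char) : Option Int × List Char × PySem.Dict Char Int :=
  let last := st.2.2.insert iv.2 iv.1
  let minI := (PySem.List.min? last.values (fun v => v)).getD 0   -- min over nonempty values
  let maxI := (PySem.List.max? last.values (fun v => v)).getD 0   -- max over nonempty values
  let emotion : Int :=
    (((PySem.List.pyGet? t maxI).getD ' ').toNat : Int) -
      (((PySem.List.pyGet? t minI).getD ' ').toNat : Int)        -- indices always in range here
  if pvGtNegInf st.1 emotion = true then
    (some emotion, PySem.List.slice t (some minI) (some (maxI + 1)), last)
  else
    (st.1, st.2.1, last)

def emotional_rollercoaster (s : String) : String :=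
  String.mk ((PySem.List.enumerate s.toList).foldl (pvStepA s.toList)
    ((none : Option Int), ([] : List Char), (PySem.Dict.empty : PySem.Dict Char Int))).2.1

-- ===== PORT B =====
-- B's test 'best is None or emotion > best'
def pvNoneOrGt (best : Option Int) (e : Int) : Bool :=
  match best with
  | none => true
  | some m => decide (m < e)

-- the while-loop of B: while cnt[s[p]] > 1: cnt[s[p]] -= 1; p += 1  (fuel only makes it total)
def pvAdvance (t : List Char) : Nat → PySem.Dict Char Int × Nat → PySem.Dict Char Int × Nat
  | 0, st => st
  | fuel+1, st =>
    let c := (PySem.List.pyGet? t (st.2 : Int)).getD ' '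
    if 1 < st.1.getD c 0 then
      pvAdvance t fuel (st.1.insert c (st.1.getD c 0 - 1), st.2 + 1)
    else st

-- loop body of B: bump the window count of ch, advance p, compare/update
def pvStepB (t : List Char) (st : Option Int × List Char × PySem.Dict Char Int × Nat)
    (iv : Int × Char) : Option Int × List Char × PySem.Dict Char Int × Nat :=
  let cnt0 := st.2.2.1.insert iv.2 (st.2.2.1.getD iv.2 0 + 1)
  let cp := pvAdvance t t.length (cnt0, st.2.2.2)
  let emotion : Int := (iv.2.toNat : Int) - (((PySem.List.pyGet? t (cp.2 : Int)).getD ' ').toNat : Int)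
  if pvNoneOrGt st.1 emotion = true then
    (some emotion, PySem.List.slice t (some (cp.2 : Int)) (some (iv.1 + 1)), cp)
  else
    (st.1, st.2.1, cp)

def emotional_rollercoaster_alt (s : String) : String :=
  String.mk ((PySem.List.enumerate s.toList).foldl (pvStepB s.toList)
    ((none : Option Int), ([] : List Char), (PySem.Dict.empty : PySem.Dict Char Int), (0 : Nat))).2.1

-- ===== PRECONDITION & SPEC =====
def Spec_emotional_rollercoaster (s : String) (out : String) : Prop := out = emotional_rollercoaster_alt s
instance (s : String) (out : String) : Decidable (Spec_emotional_rollercoaster s out) := by unfold Spec_emotional_rollercoaster; infer_instance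

-- ===== CLAIM (what is proved, stated in full; the proofs are below) =====
def Claim_equal_emotional_rollercoaster : Prop := ∀ (s : String), Dom_emotional_rollercoaster s → Spec_emotional_rollercoaster s (emotional_rollercoaster s)

-- ===== LEMMAS AND PROOFS =====

-- j is the last occurrence of its character within the prefix of length k
def pvLast (t : List Char) (k j : Nat) : Prop :=
  j < k ∧ ((t.take k).drop (j+1)).count (t.getD j ' ') = 0

-- invariant of A's dict after k steps: its items are exactly the last-occurrence pairs
def pvAInv (t : List Char) (k : Nat) (d : PySem.Dict Char Int) : Prop :=
  ∀ c v, (c, v) ∈ d.items ↔ ∃ j : Nat, v = (j : Int) ∧ pvLast t k j ∧ t.getD j ' ' = c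

-- invariant of B's counts/pointer after k steps
def pvBInv (t : List Char) (k : Nat) (cnt : PySem.Dict Char Int) (p : Nat) : Prop :=
  p ≤ k ∧ (∀ c, cnt.getD c 0 = (((t.take k).drop p).count c : Int)) ∧
    (∀ j, pvLast t k j → p ≤ j) ∧ (k ≠ 0 → pvLast t k p)

lemma pvLast_self (t : List Char) (k : Nat) (hk : k < t.length) : pvLast t (k+1) k := by
  refine ⟨by omega, ?_⟩
  have h : List.drop (k+1) (t.take (k+1)) = [] :=
    List.drop_eq_nil_of_le (by simp [List.length_take])
  simp [h]

lemma pvLast_succ (t : List Char) (k : Nat) (hk : k < t.length) (j : Nat) :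
    pvLast t (k+1) j ↔ (j = k ∨ (pvLast t k j ∧ t.getD j ' ' ≠ t.getD k ' ')) := by
  have hgetk : t.getD k ' ' = t[k] := List.getD_eq_getElem t ' ' hk
  rcases lt_trichotomy j k with hj | hj | hj
  · have hlen : j + 1 ≤ (t.take k).length := by rw [List.length_take]; omega
    have hsplit : ((t.take (k+1)).drop (j+1)).count (t.getD j ' ')
        = ((t.take k).drop (j+1)).count (t.getD j ' ')
          + (if t.getD j ' ' = t[k] then 1 else 0) := by
      rw [List.take_succ_eq_append_getElem hk, List.drop_append_of_le_length hlen,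
        List.count_append]
      congr 1
      by_cases hc : t.getD j ' ' = t[k]
      · rw [if_pos hc, hc, List.count_cons_self, List.count_nil]
      · have hc' : t[k] ≠ t.getD j ' ' := fun h => hc h.symm
        rw [if_neg hc, List.count_cons_of_ne hc', List.count_nil]
    constructor
    · rintro ⟨-, h⟩
      rw [hsplit] at h
      by_cases hc : t.getD j ' ' = t[k]
      · rw [if_pos hc] at h; omega
      · rw [if_neg hc] at h
        refine Or.inr ⟨⟨hj, by omega⟩, ?_⟩
        rw [hgetk]; exact hc
    · rintro (hj2 | ⟨⟨-, h⟩, hne⟩)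
      · omega
      · have hne' : ¬ t.getD j ' ' = t[k] := by rw [← hgetk]; exact hne
        refine ⟨by omega, ?_⟩
        rw [hsplit, h, if_neg hne']
  · subst hj
    constructor
    · intro _; exact Or.inl rfl
    · intro _; exact pvLast_self t _ hk
  · constructor
    · rintro ⟨h1, -⟩; omega
    · rintro (h1 | ⟨⟨h1, -⟩, -⟩) <;> omega

lemma pvGet_getD (t : List Char) (p : Nat) (hp : p < t.length) :
    (PySem.List.pyGet? t (p : Int)).getD ' ' = t.getD p ' ' := by
  rw [PySem.List.pyGet?_natCast, List.getElem?_eq_getElem hp, Option.getD_some,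
    List.getD_eq_getElem t ' ' hp]

lemma pvCount_head (t : List Char) (K p : Nat) (hp : p < K) (hK : K ≤ t.length) (c : Char) :
    ((t.take K).drop p).count c =
      (if t.getD p ' ' = c then 1 else 0) + ((t.take K).drop (p+1)).count c := by
  have hlt : p < (t.take K).length := by rw [List.length_take]; omega
  have hgd : t.getD p ' ' = t[p] := List.getD_eq_getElem t ' ' (lt_of_lt_of_le hp hK)
  have hg : (t.take K)[p] = t[p] := List.getElem_take
  rw [List.drop_eq_getElem_cons hlt, hg, ← hgd]
  by_cases hc : t.getD p ' ' = c
  · rw [if_pos hc, hc, List.count_cons_self]; omega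
  · have hc' : t.getD p ' ' ≠ c := hc
    rw [if_neg hc, List.count_cons_of_ne hc']; omega

lemma pvAdvance_spec (t : List Char) (K q : Nat) (hK : K ≤ t.length)
    (hq : pvLast t K q) (hqmin : ∀ j, pvLast t K j → q ≤ j) :
    ∀ fuel p cnt, p ≤ q → q - p ≤ fuel →
      (∀ c, cnt.getD c 0 = (((t.take K).drop p).count c : Int)) →
      (pvAdvance t fuel (cnt, p)).2 = q ∧
        ∀ c, (pvAdvance t fuel (cnt, p)).1.getD c 0 = (((t.take K).drop q).count c : Int) := by
  intro fuel
  induction fuel with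
  | zero =>
    intro p cnt hpq hfuel hcnt
    have hp : p = q := by omega
    subst hp
    exact ⟨rfl, hcnt⟩
  | succ fuel ih =>
    intro p cnt hpq hfuel hcnt
    have hqK : q < K := hq.1
    have hpK : p < K := lt_of_le_of_lt hpq hqK
    have hpt : p < t.length := lt_of_lt_of_le hpK hK
    have hgd := pvGet_getD t p hpt
    have hcount := pvCount_head t K p hpK hK (t.getD p ' ')
    rw [if_pos rfl] at hcount
    rcases eq_or_lt_of_le hpq with rfl | hlt
    · have h0 : ((t.take K).drop (p+1)).count (t.getD p ' ') = 0 := hq.2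
      have h1 : ¬ (1 < cnt.getD (t.getD p ' ') 0) := by
        rw [hcnt, hcount, h0]; norm_num
      simp only [pvAdvance, hgd, if_neg h1]
      exact ⟨by trivial, hcnt⟩
    · have hnl : ¬ pvLast t K p := fun hl => absurd (hqmin p hl) (by omega)
      have hpos : ((t.take K).drop (p+1)).count (t.getD p ' ') ≠ 0 := by
        intro h0; exact hnl ⟨hpK, h0⟩
      have h2 : 1 < cnt.getD (t.getD p ' ') 0 := by
        rw [hcnt, hcount]; push_cast; omega
      simp only [pvAdvance, hgd, if_pos h2]
      apply ih (p+1) _ (by omega) (by omega)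
      intro c
      rw [PySem.Dict.getD_insert]
      by_cases hc : c = t.getD p ' '
      · rw [if_pos hc, hc, hcnt, hcount]
        push_cast; omega
      · have hc' : ¬ t.getD p ' ' = c := fun h => hc h.symm
        rw [if_neg hc, hcnt c, pvCount_head t K p hpK hK c, if_neg hc']
        push_cast; omega

lemma pvAInv_step (t : List Char) (k : Nat) (d : PySem.Dict Char Int) (hk : k < t.length)
    (h : pvAInv t k d) : pvAInv t (k+1) (d.insert (t.getD k ' ') (k : Int)) := by
  intro c v
  rw [PySem.Dict.mem_items_insert]
  constructor
  · rintro (h1 | ⟨h2, hne⟩)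
    · rw [Prod.ext_iff] at h1
      obtain ⟨h1a, h1b⟩ := h1
      exact ⟨k, h1b, pvLast_self t k hk, h1a.symm⟩
    · obtain ⟨j, rfl, hl, rfl⟩ := (h c v).mp h2
      exact ⟨j, rfl, (pvLast_succ t k hk j).mpr (Or.inr ⟨hl, hne⟩), rfl⟩
  · rintro ⟨j, rfl, hl, rfl⟩
    rcases (pvLast_succ t k hk j).mp hl with rfl | ⟨hl2, hne⟩
    · exact Or.inl rfl
    · exact Or.inr ⟨(h _ _).mpr ⟨j, rfl, hl2, rfl⟩, hne⟩

lemma pvMem_values (d : PySem.Dict Char Int) (t : List Char) (K : Nat) (hA : pvAInv t K d)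
    (v : Int) : v ∈ d.values ↔ ∃ j : Nat, v = (j : Int) ∧ pvLast t K j := by
  constructor
  · intro hv
    obtain ⟨⟨c, v'⟩, hmem, rfl⟩ := List.mem_map.mp hv
    obtain ⟨j, rfl, hl, -⟩ := (hA c v').mp hmem
    exact ⟨j, rfl, hl⟩
  · rintro ⟨j, rfl, hl⟩
    exact List.mem_map.mpr ⟨(t.getD j ' ', (j : Int)),
      (hA (t.getD j ' ') (j : Int)).mpr ⟨j, rfl, hl, rfl⟩, rfl⟩

lemma pvMin_values (t : List Char) (K q : Nat) (d : PySem.Dict Char Int) (hA : pvAInv t K d)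
    (hq : pvLast t K q) (hqmin : ∀ j, pvLast t K j → q ≤ j) :
    (PySem.List.min? d.values (fun v => v)).getD 0 = (q : Int) := by
  have hqv : (q : Int) ∈ d.values := (pvMem_values d t K hA _).mpr ⟨q, rfl, hq⟩
  obtain ⟨m, hm⟩ : ∃ m, PySem.List.min? d.values (fun v => v) = some m := by
    cases h : PySem.List.min? d.values (fun v => v) with
    | none =>
      rw [PySem.List.min?_eq_none_iff] at h
      rw [h] at hqv; cases hqv
    | some m => exact ⟨m, rfl⟩
  obtain ⟨j, rfl, hl⟩ := (pvMem_values d t K hA m).mp (PySem.List.min?_mem hm)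
  have h1 : (j : Int) ≤ (q : Int) := PySem.List.min?_isMin hm _ hqv
  have h2 : q ≤ j := hqmin j hl
  rw [hm, Option.getD_some]
  have hj : j = q := by omega
  rw [hj]

lemma pvMax_values (t : List Char) (K m : Nat) (d : PySem.Dict Char Int) (hA : pvAInv t K d)
    (hm : pvLast t K m) (hmmax : ∀ j, pvLast t K j → j ≤ m) :
    (PySem.List.max? d.values (fun v => v)).getD 0 = (m : Int) := by
  have hmv : (m : Int) ∈ d.values := (pvMem_values d t K hA _).mpr ⟨m, rfl, hm⟩
  obtain ⟨w, hw⟩ : ∃ w, PySem.List.max? d.values (fun v => v) = some w := by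
    cases h : PySem.List.max? d.values (fun v => v) with
    | none =>
      rw [PySem.List.max?_eq_none_iff] at h
      rw [h] at hmv; cases hmv
    | some w => exact ⟨w, rfl⟩
  obtain ⟨j, rfl, hl⟩ := (pvMem_values d t K hA w).mp (PySem.List.max?_mem hw)
  have h1 : (m : Int) ≤ (j : Int) := PySem.List.max?_isMax hw _ hmv
  have h2 : j ≤ m := hmmax j hl
  rw [hw, Option.getD_some]
  have hj : j = m := by omega
  rw [hj]

-- the two fold states after processing the first k characters
def pvAst (t : List Char) (k : Nat) : Option Int × List Char × PySem.Dict Char Int :=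
  (PySem.List.enumerate (t.take k)).foldl (pvStepA t)
    ((none : Option Int), ([] : List Char), (PySem.Dict.empty : PySem.Dict Char Int))

def pvBst (t : List Char) (k : Nat) : Option Int × List Char × PySem.Dict Char Int × Nat :=
  (PySem.List.enumerate (t.take k)).foldl (pvStepB t)
    ((none : Option Int), ([] : List Char), (PySem.Dict.empty : PySem.Dict Char Int), (0 : Nat))

lemma pvMain_inv (t : List Char) : ∀ k, k ≤ t.length →
    (pvAst t k).1 = (pvBst t k).1 ∧ (pvAst t k).2.1 = (pvBst t k).2.1 ∧
      pvAInv t k (pvAst t k).2.2 ∧ pvBInv t k (pvBst t k).2.2.1 (pvBst t k).2.2.2 := by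
  intro k
  induction k with
  | zero =>
    intro _
    refine ⟨rfl, rfl, ?_, le_rfl, ?_, ?_, ?_⟩
    · intro c v
      constructor
      · intro hv
        simp only [pvAst, List.take_zero, PySem.List.enumerate_nil, List.foldl_nil] at hv
        cases hv
      · rintro ⟨j, -, ⟨hj, -⟩, -⟩; omega
    · intro c
      simp [pvBst]
    · rintro j ⟨hj, -⟩; omega
    · intro h; exact absurd rfl h
  | succ k ih =>
    intro hk1
    have hk : k < t.length := by omega
    obtain ⟨hbest, hrange, hA, hB⟩ := ih (by omega)
    have hlen : (t.take k).length = k := by rw [List.length_take]; omega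
    have henum : PySem.List.enumerate (t.take (k+1)) 0 =
        PySem.List.enumerate (t.take k) 0 ++ [((k : Int), t[k])] := by
      rw [List.take_succ_eq_append_getElem hk, PySem.List.enumerate_append,
        PySem.List.enumerate_cons, PySem.List.enumerate_nil, hlen]
      norm_num
    have hAst : pvAst t (k+1) = pvStepA t (pvAst t k) ((k : Int), t[k]) := by
      unfold pvAst
      rw [henum, List.foldl_append, List.foldl_cons, List.foldl_nil]
    have hBst : pvBst t (k+1) = pvStepB t (pvBst t k) ((k : Int), t[k]) := by
      unfold pvBst
      rw [henum, List.foldl_append, List.foldl_cons, List.foldl_nil]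
    obtain ⟨hple, hcnt, hmin_old, -⟩ := hB
    haveI : DecidablePred (pvLast t (k+1)) := fun j => Classical.dec _
    have hex : ∃ j, pvLast t (k+1) j := ⟨k, pvLast_self t k hk⟩
    have hq : pvLast t (k+1) (Nat.find hex) := Nat.find_spec hex
    have hqmin : ∀ j, pvLast t (k+1) j → Nat.find hex ≤ j :=
      fun j hj => Nat.find_min' hex hj
    have hqk : Nat.find hex ≤ k := by have := hq.1; omega
    have hpq : (pvBst t k).2.2.2 ≤ Nat.find hex := by
      rcases (pvLast_succ t k hk _).mp hq with heq | ⟨hl, -⟩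
      · rw [heq]; exact hple
      · exact hmin_old _ hl
    have hcnt0 : ∀ c,
        ((pvBst t k).2.2.1.insert t[k] ((pvBst t k).2.2.1.getD t[k] 0 + 1)).getD c 0
          = (((t.take (k+1)).drop (pvBst t k).2.2.2).count c : Int) := by
      intro c
      have hdrop : (t.take (k+1)).drop (pvBst t k).2.2.2
          = (t.take k).drop (pvBst t k).2.2.2 ++ [t[k]] := by
        rw [List.take_succ_eq_append_getElem hk,
          List.drop_append_of_le_length (by rw [hlen]; exact hple)]
      rw [hdrop, List.count_append, PySem.Dict.getD_insert]
      by_cases hc : c = t[k]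
      · rw [if_pos hc, hc, hcnt t[k], List.count_cons_self, List.count_nil]
        push_cast; omega
      · have h0 : List.count c [t[k]] = 0 := by
          rw [List.count_eq_zero]
          simp [hc]
        rw [if_neg hc, hcnt c, h0]
        push_cast; omega
    have hadv := pvAdvance_spec t (k+1) (Nat.find hex) (by omega) hq hqmin
      t.length (pvBst t k).2.2.2 _ hpq (by omega) hcnt0
    have hA' : pvAInv t (k+1) ((pvAst t k).2.2.insert t[k] (k : Int)) := by
      have h := pvAInv_step t k (pvAst t k).2.2 hk hA
      rwa [List.getD_eq_getElem t ' ' hk] at h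
    have hmin := pvMin_values t (k+1) (Nat.find hex) _ hA' hq hqmin
    have hmax := pvMax_values t (k+1) k _ hA' (pvLast_self t k hk)
      (fun j hj => by have := hj.1; omega)
    have hgetk : (PySem.List.pyGet? t ((k : Int))).getD ' ' = t[k] := by
      rw [pvGet_getD t k hk, List.getD_eq_getElem t ' ' hk]
    have hbetter : ∀ b e, pvGtNegInf b e = pvNoneOrGt b e := fun b e => by
      cases b <;> rfl
    rw [hAst, hBst]
    simp only [pvStepA, pvStepB, hmin, hmax, hadv.1, hbest, hrange, hgetk, hbetter]
    split
    all_goals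
      refine ⟨rfl, rfl, hA', ?_⟩
      dsimp only
      rw [hadv.1]
      exact ⟨by omega, hadv.2, hqmin, fun _ => hq⟩

-- ===== VERDICT (by name: the statement is the Claim_ definition above) =====
theorem emotional_rollercoaster_spec : Claim_equal_emotional_rollercoaster := by
  intro s _
  unfold Spec_emotional_rollercoaster emotional_rollercoaster emotional_rollercoaster_alt
  have h := (pvMain_inv s.toList s.toList.length le_rfl).2.1
  unfold pvAst pvBst at h
  rw [List.take_length] at h
  rw [h]
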